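-- pv_equiv track=rewrite | github.com/isk02206/python | informatics/previous informatics/Infomatics-1/7/O_draconian_devil.py | anagramHash
-- ===== SOURCE A (Python) =====
-- def anagramHash(sentence, list1):
--     '''
--     >>> anagramHash('Leonardo Da Vinci', nPrime(26))
--     4153036139030192260
--     >>> anagramHash('Leonardo Da Vinci', range(1, 27))
--     4073908608000
--     >>> anagramHash('Leonardo Da Vinci', nPrime(52)[-26:])
--     280080025163413341541861091223919
--     >>> anagramHash('O Draconian Devil', nPrime(26))
--     4153036139030192260
--
--
--     '''
--     count = 1
--
--     sentence = sentence.lower()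
--
--     for char in sentence:
--
--         if char.isalpha():
--
--             pos = ord(char) - 97
--
--             count = count * list1[pos]
--
--     return count
-- ===== SOURCE B (Python) =====
-- def anagramHash(sentence, list1):
--     # count-then-combine: frequency table of letter positions, then one pow per distinct letter
--     count = {}
--     for char in sentence.lower():
--         if char.isalpha():
--             pos = ord(char) - 97
--             count[pos] = count.get(pos, 0) + 1
--     result = 1
--     for pos, k in count.items():
--         result = result * list1[pos] ** k
--     return result
-- ===== Notes on version B (the rewrite author's own statement) =====
-- stated objective: faster
-- what changed: Replaces the single running-product scan with a count-then-combine decomposition: one pass builds a frequency table of letter positions, then one exponentiation per distinct letter forms the product, cutting the number of big-integer multiplications from one per letter to O(log) per distinct letter.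
import Mathlib
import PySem

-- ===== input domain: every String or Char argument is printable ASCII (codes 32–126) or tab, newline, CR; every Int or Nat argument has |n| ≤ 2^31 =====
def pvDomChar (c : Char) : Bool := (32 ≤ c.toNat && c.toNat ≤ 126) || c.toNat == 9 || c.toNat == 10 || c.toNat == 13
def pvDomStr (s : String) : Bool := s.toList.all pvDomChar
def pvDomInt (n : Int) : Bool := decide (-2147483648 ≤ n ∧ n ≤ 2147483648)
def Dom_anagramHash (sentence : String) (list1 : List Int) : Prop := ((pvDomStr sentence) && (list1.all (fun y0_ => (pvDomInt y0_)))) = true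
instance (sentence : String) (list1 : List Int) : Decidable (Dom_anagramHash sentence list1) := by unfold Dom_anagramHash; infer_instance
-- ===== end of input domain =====

-- B replaces A's single running-product scan by a count-then-combine pass over a frequency
-- table of letter positions (alternative decomposition; same return value, proved below).


-- ===== PORT A =====
-- literal port of A: one scan over the lowered sentence multiplying list1[ord(c)-97];
-- the option accumulator is `none` exactly where Python raises IndexError (excluded by Pre_).
def anagramHash (sentence : String) (list1 : List Int) : Int :=
  ((PySem.Str.lower sentence).toList.foldl
    (fun acc c =>
      if PySem.Chars.isalpha c then
        match acc, PySem.List.pyGet? list1 ((c.toNat : Int) - 97) with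
        | some a, some v => some (a * v)
        | _, _ => none
      else acc)
    (some 1)).getD 0

-- ===== PORT B =====
-- literal port of B: the first loop builds the frequency table count[pos] = count.get(pos,0)+1,
-- the second multiplies list1[pos] ** k over its items (option accumulator = IndexError, as above).
def anagramHash_alt (sentence : String) (list1 : List Int) : Int :=
  ((((PySem.Str.lower sentence).toList.foldl
      (fun (d : PySem.Dict Int Int) c =>
        if PySem.Chars.isalpha c then
          d.insert ((c.toNat : Int) - 97) (d.getD ((c.toNat : Int) - 97) 0 + 1)
        else d)
      PySem.Dict.empty).items).foldl
    (fun acc pk =>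
      acc.bind (fun a => (PySem.List.pyGet? list1 pk.1).map (fun v => a * v ^ pk.2.toNat)))
    (some 1)).getD 0

-- ===== PRECONDITION & SPEC =====
-- Pre_ excludes exactly the inputs on which A raises IndexError: a letter of the lowered
-- sentence whose position ord(c)-97 is not a valid index of list1.
def Pre_anagramHash (sentence : String) (list1 : List Int) : Prop :=
  (sentence.toList.all (fun c =>
    !(PySem.Chars.isalpha (PySem.Chars.lowerChar c)) ||
    (decide (0 ≤ ((PySem.Chars.lowerChar c).toNat : Int) - 97) &&
     decide (((PySem.Chars.lowerChar c).toNat : Int) - 97 < (list1.length : Int))))) = true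
instance (sentence : String) (list1 : List Int) : Decidable (Pre_anagramHash sentence list1) := by unfold Pre_anagramHash; infer_instance

def pvWitness_anagramHash : String × List Int := ("Ba b", [2, 3])

def Spec_anagramHash (sentence : String) (list1 : List Int) (out : Int) : Prop := out = anagramHash_alt sentence list1
instance (sentence : String) (list1 : List Int) (out : Int) : Decidable (Spec_anagramHash sentence list1 out) := by unfold Spec_anagramHash; infer_instance

-- ===== CLAIM (what is proved, stated in full; the proofs are below) =====
def Claim_equal_anagramHash : Prop := ∀ (sentence : String) (list1 : List Int), Dom_anagramHash sentence list1 → Pre_anagramHash sentence list1 → Spec_anagramHash sentence list1 (anagramHash sentence list1)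

-- ===== LEMMAS AND PROOFS =====

-- the value list1[p] (only cited where Pre_ guarantees the index is in range)
def pvF (list1 : List Int) (p : Int) : Int := (PySem.List.pyGet? list1 p).getD 0

theorem pvGet_some (xs : List Int) (p : Int) (h0 : 0 ≤ p) (h1 : p < (xs.length : Int)) :
    PySem.List.pyGet? xs p = some (pvF xs p) := by
  obtain ⟨n, rfl⟩ := Int.eq_ofNat_of_zero_le h0
  have h : n < xs.length := by exact_mod_cast h1
  simp [pvF, PySem.List.pyGet?, PySem.List.pyIdx?, h]

-- A's product loop returns some (a * product) when every index is in range
theorem foldA (list1 : List Int) (l : List Int)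
    (h : ∀ p ∈ l, PySem.List.pyGet? list1 p = some (pvF list1 p)) (a : Int) :
    l.foldl
      (fun acc p =>
        match acc, PySem.List.pyGet? list1 p with
        | some a, some v => some (a * v)
        | _, _ => none)
      (some a)
    = some (a * (l.map (pvF list1)).prod) := by
  induction l generalizing a with
  | nil => simp
  | cons p t ih =>
    have hp := h p (by simp)
    simp only [List.foldl_cons, hp]
    rw [ih (fun q hq => h q (by simp [hq]))]
    simp [mul_assoc]

-- B's combine loop over (position, multiplicity) pairs
theorem foldB (list1 : List Int) (q : List (Int × Int))
    (h : ∀ pk ∈ q, PySem.List.pyGet? list1 pk.1 = some (pvF list1 pk.1)) (a : Int) :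
    q.foldl
      (fun acc pk =>
        acc.bind (fun a => (PySem.List.pyGet? list1 pk.1).map (fun v => a * v ^ pk.2.toNat)))
      (some a)
    = some (a * (q.map (fun pk => pvF list1 pk.1 ^ pk.2.toNat)).prod) := by
  induction q generalizing a with
  | nil => simp
  | cons pk t ih =>
    have hp := h pk (by simp)
    simp only [List.foldl_cons, hp, Option.bind_some, Option.map_some]
    rw [ih (fun r hr => h r (by simp [hr]))]
    simp [mul_assoc]

-- bumping the exponent of one element of a duplicate-free list multiplies the product by f p
theorem prod_pow_bump (f : Int → Int) (c : Int → ℕ) (p : Int) :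
    ∀ (S : List Int), S.Nodup → p ∈ S →
      (S.map (fun k => f k ^ (c k + if p = k then 1 else 0))).prod
        = (S.map (fun k => f k ^ c k)).prod * f p := by
  intro S
  induction S with
  | nil => simp
  | cons q t ih =>
    intro hnd hmem
    rcases List.mem_cons.mp hmem with h | h
    · subst h
      have hnotin : p ∉ t := (List.nodup_cons.mp hnd).1
      have ht : t.map (fun k => f k ^ (c k + if p = k then 1 else 0))
          = t.map (fun k => f k ^ c k) := by
        apply List.map_congr_left
        intro k hk
        have : p ≠ k := fun he => hnotin (he ▸ hk)
        simp [this]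
      simp [ht, pow_succ]
      ring
    · have hpq : p ≠ q := fun he => (List.nodup_cons.mp hnd).1 (he ▸ h)
      simp only [List.map_cons, List.prod_cons, if_neg hpq,
        ih (List.nodup_cons.mp hnd).2 h, Nat.add_zero]
      ring

-- the count-then-combine regrouping: the product over the distinct letters of f k ^ count k
-- equals the plain left-to-right product
theorem prod_counter (f : Int → Int) :
    ∀ (ps : List Int),
      ((PySem.Set.ofList ps).map (fun k => f k ^ ps.count k)).prod = (ps.map f).prod := by
  intro ps
  induction ps using List.reverseRecOn with
  | nil => simp [PySem.Set.ofList]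
  | append_singleton t p ih =>
    have hset : PySem.Set.ofList (t ++ [p]) = PySem.Set.add (PySem.Set.ofList t) p := by
      simp [PySem.Set.ofList_eq_foldl, List.foldl_append]
    have hcnt : ∀ k : Int, (t ++ [p]).count k = t.count k + if p = k then 1 else 0 := by
      intro k
      by_cases h : p = k <;> simp [List.count_append, h]
    by_cases hp : p ∈ PySem.Set.ofList t
    · have hadd : PySem.Set.add (PySem.Set.ofList t) p = PySem.Set.ofList t := by
        simp [PySem.Set.add, PySem.Set.contains, hp]
      have hnd : (PySem.Set.ofList t).Nodup := PySem.Set.nodup_ofList t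
      calc ((PySem.Set.ofList (t ++ [p])).map (fun k => f k ^ (t ++ [p]).count k)).prod
          = ((PySem.Set.ofList t).map (fun k => f k ^ (t.count k + if p = k then 1 else 0))).prod := by
            rw [hset, hadd]; exact congrArg _ (List.map_congr_left (fun k _ => by rw [hcnt k]))
        _ = ((PySem.Set.ofList t).map (fun k => f k ^ t.count k)).prod * f p :=
            prod_pow_bump f _ p _ hnd hp
        _ = (t.map f).prod * f p := by rw [ih]
        _ = ((t ++ [p]).map f).prod := by simp
    · have hadd : PySem.Set.add (PySem.Set.ofList t) p = PySem.Set.ofList t ++ [p] := by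
        simp [PySem.Set.add, PySem.Set.contains, hp]
      have hcp : t.count p = 0 :=
        List.count_eq_zero.mpr (fun h => hp ((PySem.Set.mem_ofList _ _).mpr h))
      have hmap : (PySem.Set.ofList t).map (fun k => f k ^ (t ++ [p]).count k)
          = (PySem.Set.ofList t).map (fun k => f k ^ t.count k) := by
        apply List.map_congr_left
        intro k hk
        have : p ≠ k := fun he => hp (he ▸ hk)
        rw [hcnt k, if_neg this, Nat.add_zero]
      rw [hset, hadd, List.map_append, List.prod_append, hmap, ih]
      simp [hcp]

-- ===== VERDICT (by name: the statement is the Claim_ definition above) =====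
theorem anagramHash_spec : Claim_equal_anagramHash := by
  intro sentence list1 _ hpre
  have hpre' : ∀ c ∈ (PySem.Str.lower sentence).toList, PySem.Chars.isalpha c = true →
      (0 ≤ (c.toNat : Int) - 97 ∧ (c.toNat : Int) - 97 < (list1.length : Int)) := by
    have hll : (PySem.Str.lower sentence).toList = sentence.toList.map PySem.Chars.lowerChar := by
      simp [PySem.Str.toList_lower]; rfl
    rw [hll]
    intro c hc hca
    rcases List.mem_map.mp hc with ⟨c0, hc0, rfl⟩
    have := List.all_eq_true.mp hpre c0 hc0
    simp only [Bool.or_eq_true, Bool.and_eq_true, Bool.not_eq_true', decide_eq_true_eq] at this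
    rcases this with h | h
    · exact absurd hca (by simp [h])
    · exact h
  clear hpre
  unfold Spec_anagramHash anagramHash anagramHash_alt
  rw [PySem.List.foldl_if_eq_foldl_filter, PySem.List.foldl_if_eq_foldl_filter]
  set ls := (PySem.Str.lower sentence).toList.filter PySem.Chars.isalpha
  set ps := ls.map (fun c => ((c.toNat : Int) - 97)) with hps
  have hmemps : ∀ p ∈ ps, PySem.List.pyGet? list1 p = some (pvF list1 p) := by
    intro p hpmem
    rcases List.mem_map.mp hpmem with ⟨c, hc, rfl⟩
    rcases List.mem_filter.mp hc with ⟨hcm, hca⟩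
    obtain ⟨h0, h1⟩ := hpre' c hcm hca
    exact pvGet_some list1 _ h0 h1
  have eA : ls.foldl
      (fun (acc : Option Int) c =>
        match acc, PySem.List.pyGet? list1 ((c.toNat : Int) - 97) with
        | some a, some v => some (a * v)
        | _, _ => none) (some 1)
      = ps.foldl
        (fun (acc : Option Int) p =>
          match acc, PySem.List.pyGet? list1 p with
          | some a, some v => some (a * v)
          | _, _ => none) (some 1) := by
    rw [hps, List.foldl_map]
  have eD : ls.foldl
      (fun (d : PySem.Dict Int Int) c =>
        d.insert ((c.toNat : Int) - 97) (d.getD ((c.toNat : Int) - 97) 0 + 1))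
      PySem.Dict.empty
      = ps.foldl (fun d p => d.insert p (d.getD p 0 + 1)) PySem.Dict.empty := by
    rw [hps, List.foldl_map]
  rw [eA, eD, PySem.Dict.foldl_insert_getD_add_one_eq_counter, foldA list1 ps hmemps 1]
  rw [PySem.Dict.items_counter]
  have hq : ∀ pk ∈ (PySem.Set.ofList ps).map (fun k => (k, (ps.count k : Int))),
      PySem.List.pyGet? list1 pk.1 = some (pvF list1 pk.1) := by
    intro pk hpk
    rcases List.mem_map.mp hpk with ⟨k, hk, rfl⟩
    exact hmemps k ((PySem.Set.mem_ofList _ _).mp hk)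
  rw [foldB list1 _ hq 1]
  simp only [Option.getD_some, one_mul, List.map_map]
  rw [← prod_counter (pvF list1) ps]
  exact congrArg _ (List.map_congr_left (fun k _ => by
    simp [Int.toNat_natCast]))
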